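-- pv_equiv track=rewrite | github.com/sebastianorellanav/Cifrado_Simetrico | main.py | revertirSubkeys
-- ===== SOURCE A (Python) =====
-- RONDAS = 8
--
-- def revertirSubkeys(keys):
--     skaux = []
--     i = 0
--     for v in range(0, len(keys)//RONDAS):
--         aux = keys[i: i+RONDAS]
--         aux = aux[::-1]
--         skaux.extend(aux)
--         i += RONDAS
--     return skaux
-- ===== SOURCE B (Python) =====
-- RONDAS = 8
--
-- def revertirSubkeys(keys):
--     n = (len(keys) // RONDAS) * RONDAS
--     return [keys[(i // RONDAS) * RONDAS + (RONDAS - 1 - i % RONDAS)] for i in range(n)]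
-- ===== Notes on version B (the rewrite author's own statement) =====
-- stated objective: alternative
-- what changed: Replaces the block-slice-reverse-extend loop with a single positional comprehension over range((len//8)*8) that fetches each output element directly by index arithmetic, maintaining no intermediate block buffers.
import Mathlib
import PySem

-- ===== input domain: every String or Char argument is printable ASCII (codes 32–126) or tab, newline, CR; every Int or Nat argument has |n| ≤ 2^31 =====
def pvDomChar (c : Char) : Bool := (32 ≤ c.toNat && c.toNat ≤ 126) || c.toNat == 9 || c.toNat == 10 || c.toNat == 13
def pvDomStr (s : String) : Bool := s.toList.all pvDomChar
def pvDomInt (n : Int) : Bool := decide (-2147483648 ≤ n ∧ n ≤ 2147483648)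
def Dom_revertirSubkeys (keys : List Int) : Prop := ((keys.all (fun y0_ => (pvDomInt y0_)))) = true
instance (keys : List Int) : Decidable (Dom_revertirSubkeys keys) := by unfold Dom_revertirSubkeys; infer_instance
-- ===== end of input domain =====

-- B rebuilds the result by per-element index arithmetic over a single range instead of
-- slicing, reversing and extending block buffers (objective: alternative decomposition).

-- ===== PORT A =====
-- literal transliteration: state (skaux, i); aux[::-1] is reversal (PySem.List.slice?_none_none_neg_one)
def revertirSubkeys (keys : List Int) : List Int :=
  ((PySem.List.pyRange 0 (PySem.Int.floordiv (keys.length : Int) 8) 1).foldl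
    (fun st _v =>
      let aux := PySem.List.slice keys (some st.2) (some (st.2 + 8))
      let aux := aux.reverse
      (st.1 ++ aux, st.2 + 8))
    ([], 0)).1

-- ===== PORT B =====
-- indices are always in range (proved below), so pyGetD's default is never used
def revertirSubkeys_alt (keys : List Int) : List Int :=
  (PySem.List.pyRange 0 (PySem.Int.floordiv (keys.length : Int) 8 * 8) 1).map
    (fun i => PySem.List.pyGetD keys (PySem.Int.floordiv i 8 * 8 + (8 - 1 - PySem.Int.mod i 8)) 0)

-- ===== PRECONDITION & SPEC =====
def Spec_revertirSubkeys (keys : List Int) (out : List Int) : Prop := out = revertirSubkeys_alt keys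
instance (keys : List Int) (out : List Int) : Decidable (Spec_revertirSubkeys keys out) := by unfold Spec_revertirSubkeys; infer_instance

-- ===== CLAIM (what is proved, stated in full; the proofs are below) =====
def Claim_equal_revertirSubkeys : Prop := ∀ (keys : List Int), Dom_revertirSubkeys keys → Spec_revertirSubkeys keys (revertirSubkeys keys)

-- ===== LEMMAS AND PROOFS =====

-- canonical value: the first v reversed 8-blocks of keys
def specBlocks (keys : List Int) : Nat → List Int
  | 0 => []
  | v + 1 => specBlocks keys v ++ (PySem.List.slice keys (some ((8 * v : Nat) : Int)) (some (((8 * v : Nat) : Int) + 8))).reverse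

-- the per-element index function used by port B
def gIdx (keys : List Int) (i : Int) : Int :=
  PySem.List.pyGetD keys (PySem.Int.floordiv i 8 * 8 + (8 - 1 - PySem.Int.mod i 8)) 0

theorem A_inv (keys : List Int) (k : Nat) :
    (PySem.List.pyRange 0 (k : Int) 1).foldl
      (fun st _v =>
        let aux := PySem.List.slice keys (some st.2) (some (st.2 + 8))
        let aux := aux.reverse
        (st.1 ++ aux, st.2 + 8))
      ([], 0) = (specBlocks keys k, ((8 * k : Nat) : Int)) := by
  induction k with
  | zero => simp [PySem.List.pyRange_one_eq_nil, specBlocks]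
  | succ k ih =>
    have hc : ((k + 1 : Nat) : Int) = (k : Int) + 1 := by push_cast; ring
    rw [hc, PySem.List.pyRange_one_succ_right (by positivity), List.foldl_append, ih]
    simp only [List.foldl_cons, List.foldl_nil, specBlocks, Prod.mk.injEq]
    refine ⟨trivial, by push_cast; ring⟩

theorem block_eq (keys : List Int) (v : Nat) (h : 8 * v + 8 ≤ keys.length) :
    (PySem.List.pyRange ((8 * v : Nat) : Int) (((8 * v : Nat) : Int) + 8) 1).map (gIdx keys)
      = (PySem.List.slice keys (some ((8 * v : Nat) : Int)) (some (((8 * v : Nat) : Int) + 8))).reverse := by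
  have hsl : PySem.List.slice keys (some ((8 * v : Nat) : Int)) (some (((8 * v : Nat) : Int) + 8))
      = (keys.drop (8 * v)).take 8 := by
    have : (((8 * v : Nat) : Int) + 8) = (((8 * v + 8 : Nat)) : Int) := by push_cast; ring
    rw [this, PySem.List.slice_natCast]
    congr 1
    omega
  rw [hsl, PySem.List.pyRange_one]
  have hlen : ((((8 * v : Nat) : Int) + 8 - ((8 * v : Nat) : Int))).toNat = 8 := by omega
  rw [hlen]
  apply List.ext_getElem
  · simp
    omega
  · intro r h1 h2
    simp only [List.getElem_map, List.getElem_range]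
    have hr : r < 8 := by simpa using h1
    have hidx : ((8 * v : Nat) : Int) + (r : Int) = ((8 * v + r : Nat) : Int) := by push_cast; ring
    have hg : gIdx keys (((8 * v : Nat) : Int) + (r : Int)) = keys.getD (8 * v + 7 - r) 0 := by
      rw [hidx]
      unfold gIdx
      have hfd : PySem.Int.floordiv ((8 * v + r : Nat) : Int) 8 * 8
          + (8 - 1 - PySem.Int.mod ((8 * v + r : Nat) : Int) 8) = ((8 * v + 7 - r : Nat) : Int) := by
        rw [PySem.Int.floordiv_eq_ediv_of_pos (by norm_num), PySem.Int.mod_eq_emod_of_pos (by norm_num)]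
        omega
      rw [hfd, PySem.List.pyGetD_natCast]
    rw [hg]
    rw [List.getElem_reverse]
    have hdlen : (keys.drop (8 * v)).length = keys.length - 8 * v := by simp
    have htlen : ((keys.drop (8 * v)).take 8).length = 8 := by simp; omega
    rw [List.getElem_take, List.getElem_drop]
    rw [List.getD_eq_getElem keys 0 (by omega)]
    congr 1
    omega

theorem B_inv (keys : List Int) (k : Nat) (h : 8 * k ≤ keys.length) :
    (PySem.List.pyRange 0 ((8 * k : Nat) : Int) 1).map (gIdx keys) = specBlocks keys k := by
  induction k with
  | zero => simp [PySem.List.pyRange_one_eq_nil, specBlocks]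
  | succ k ih =>
    have hsplit : PySem.List.pyRange 0 ((8 * (k + 1) : Nat) : Int) 1
        = PySem.List.pyRange 0 ((8 * k : Nat) : Int) 1
          ++ PySem.List.pyRange ((8 * k : Nat) : Int) (((8 * k : Nat) : Int) + 8) 1 := by
      have : ((8 * (k + 1) : Nat) : Int) = ((8 * k : Nat) : Int) + 8 := by push_cast; ring
      rw [this, PySem.List.pyRange_one_append 0 ((8 * k : Nat) : Int) (((8 * k : Nat) : Int) + 8) (by positivity) (by omega)]
    rw [hsplit, List.map_append, ih (by omega), block_eq keys k (by omega)]
    rfl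

theorem revertirSubkeys_spec : Claim_equal_revertirSubkeys := by
  intro keys _
  unfold Spec_revertirSubkeys revertirSubkeys revertirSubkeys_alt
  have hfd : PySem.Int.floordiv ((keys.length : Nat) : Int) 8 = ((keys.length / 8 : Nat) : Int) := by
    exact_mod_cast PySem.Int.floordiv_natCast keys.length 8
  rw [hfd, A_inv keys (keys.length / 8)]
  have hmul : ((keys.length / 8 : Nat) : Int) * 8 = ((8 * (keys.length / 8) : Nat) : Int) := by
    push_cast; ring
  rw [hmul]
  exact (B_inv keys (keys.length / 8) (by omega)).symm
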